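-- pv_equiv track=rewrite | github.com/LuizFJP/Death-Math | src/my-env/DeathMath.py | multiplicationPoints
-- ===== SOURCE A (Python) =====
-- def multiplicationPoints(expression):
--   singsOfMul = expression.count('*')
--   mul = 0
--   weight = 6
--   while(singsOfMul != 0):
--     mul += weight
--     singsOfMul -= 1
--     if weight != 1:
--       weight -= 1
--   return mul
-- ===== SOURCE B (Python) =====
-- def multiplicationPoints(expression):
--   n = expression.count('*')
--   if n >= 6:
--     return n + 15
--   return n * (13 - n) // 2
-- ===== Notes on version B (the rewrite author's own statement) =====
-- stated objective: simpler
-- what changed: Replaces the decrement loop over the asterisk count with a closed-form arithmetic formula (n*(13-n)//2 for n<6, n+15 for n>=6).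
import Mathlib
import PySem

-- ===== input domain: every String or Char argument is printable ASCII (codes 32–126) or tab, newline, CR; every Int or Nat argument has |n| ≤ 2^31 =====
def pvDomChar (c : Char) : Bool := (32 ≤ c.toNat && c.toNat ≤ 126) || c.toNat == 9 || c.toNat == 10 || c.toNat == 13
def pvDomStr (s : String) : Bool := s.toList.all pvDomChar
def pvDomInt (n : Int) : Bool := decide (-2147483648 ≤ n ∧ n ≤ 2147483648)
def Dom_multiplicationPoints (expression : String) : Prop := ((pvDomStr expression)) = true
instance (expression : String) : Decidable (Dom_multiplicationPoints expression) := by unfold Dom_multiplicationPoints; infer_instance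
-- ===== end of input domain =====

-- B replaces A's decrement loop by a closed-form formula for the same sum; objective: simpler.

-- ===== PORT A =====
-- the while loop: state (singsOfMul, mul, weight), structural recursion on singsOfMul
def mulLoopA : Nat → Int → Int → Int
  | 0, mul, _ => mul
  | n + 1, mul, weight =>
      mulLoopA n (mul + weight) (if weight ≠ 1 then weight - 1 else weight)

def multiplicationPoints (expression : String) : Int :=
  mulLoopA (PySem.Str.count expression "*") 0 6

-- ===== PORT B =====
def multiplicationPoints_alt (expression : String) : Int :=
  let n : Int := (PySem.Str.count expression "*" : Int)
  if n ≥ 6 then n + 15 else PySem.Int.floordiv (n * (13 - n)) 2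

-- ===== PRECONDITION & SPEC =====
def Spec_multiplicationPoints (expression : String) (out : Int) : Prop := out = multiplicationPoints_alt expression
instance (expression : String) (out : Int) : Decidable (Spec_multiplicationPoints expression out) := by unfold Spec_multiplicationPoints; infer_instance

-- ===== CLAIM (what is proved, stated in full; the proofs are below) =====
def Claim_equal_multiplicationPoints : Prop := ∀ (expression : String), Dom_multiplicationPoints expression → Spec_multiplicationPoints expression (multiplicationPoints expression)

-- ===== LEMMAS AND PROOFS =====

-- once the weight has reached 1, each remaining step adds 1
theorem mulLoopA_one (n : Nat) (mul : Int) : mulLoopA n mul 1 = mul + n := by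
  induction n generalizing mul with
  | zero => simp [mulLoopA]
  | succ k ih => simp [mulLoopA, ih]; ring

theorem mulLoopA_closed (n : Nat) :
    mulLoopA n 0 6 =
      (if (n : Int) ≥ 6 then (n : Int) + 15
       else PySem.Int.floordiv ((n : Int) * (13 - (n : Int))) 2) := by
  by_cases h : 6 ≤ n
  · obtain ⟨m, rfl⟩ := Nat.exists_eq_add_of_le h
    rw [if_pos (by push_cast; omega), Nat.add_comm 6 m]
    simp only [mulLoopA]
    norm_num [mulLoopA_one]
    push_cast; ring
  · interval_cases n <;> decide

-- ===== VERDICT (by name: the statement is the Claim_ definition above) =====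
theorem multiplicationPoints_spec : Claim_equal_multiplicationPoints := by
  intro e _
  unfold Spec_multiplicationPoints multiplicationPoints multiplicationPoints_alt
  exact mulLoopA_closed _
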